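-- pv_equiv track=rewrite | github.com/Rolthar/Ask_Everything | translator.py | _has_unmatched_angle_brackets
-- ===== SOURCE A (Python) =====
-- def _has_unmatched_angle_brackets(query: str) -> bool:
--     depth = 0
--     for ch in query:
--         if ch == "<":
--             depth += 1
--         elif ch == ">":
--             depth -= 1
--         if depth < 0:
--             return True
--     return depth != 0
-- ===== SOURCE B (Python) =====
-- def _has_unmatched_angle_brackets(query: str) -> bool:
--     s = ''.join(c for c in query if c in '<>')
--     while '<>' in s:
--         s = s.replace('<>', '')
--     return '<' in s or '>' in s
-- ===== Notes on version B (the rewrite author's own statement) =====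
-- stated objective: alternative
-- what changed: Replaces the running depth counter with early return by pair-elimination: keep only the bracket characters, repeatedly delete adjacent matched open-close pairs, and report unmatched iff any bracket survives.
import Mathlib
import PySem

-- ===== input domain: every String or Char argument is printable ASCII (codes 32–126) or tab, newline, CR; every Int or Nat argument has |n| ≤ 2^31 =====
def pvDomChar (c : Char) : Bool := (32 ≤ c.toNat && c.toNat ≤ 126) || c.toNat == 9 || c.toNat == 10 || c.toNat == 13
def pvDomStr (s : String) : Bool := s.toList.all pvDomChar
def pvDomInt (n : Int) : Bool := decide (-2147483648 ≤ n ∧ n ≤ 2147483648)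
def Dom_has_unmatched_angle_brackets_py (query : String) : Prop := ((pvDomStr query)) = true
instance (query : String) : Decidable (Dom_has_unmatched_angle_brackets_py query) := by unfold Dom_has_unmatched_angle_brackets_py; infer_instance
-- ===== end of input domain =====

-- B replaces A's running depth counter (with early return) by pair-elimination:
-- keep only the bracket characters, repeatedly delete matched "<>" pairs, and
-- report unmatched iff any bracket survives (alternative decomposition, not faster).

-- ===== PORT A =====
-- the for-loop of A: state is `depth`; `return True` inside the loop = result true
def pvGoA : List Char → Int → Bool
  | [], depth => depth ≠ 0
  | ch :: rest, depth =>
    let d := if ch = '<' then depth + 1 else if ch = '>' then depth - 1 else depth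
    if d < 0 then true else pvGoA rest d

def has_unmatched_angle_brackets_py (query : String) : Bool :=
  pvGoA query.toList 0

-- ===== PORT B =====
-- `c in '<>'`
def pvIsBr (c : Char) : Bool := c = '<' || c = '>'

-- `s.replace('<>', '')`: one left-to-right pass deleting non-overlapping "<>"
def pvReplaceAll : List Char → List Char
  | [] => []
  | [c] => [c]
  | a :: b :: rest =>
    if a = '<' && b = '>' then pvReplaceAll rest
    else a :: pvReplaceAll (b :: rest)

-- `'<>' in s`
def pvHasPair : List Char → Bool
  | a :: b :: rest => (a = '<' && b = '>') || pvHasPair (b :: rest)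
  | _ => false

theorem pvReplaceAll_length_le (l : List Char) : (pvReplaceAll l).length ≤ l.length := by
  fun_induction pvReplaceAll l with
  | case1 => simp
  | case2 => simp
  | case3 a b rest h ih => simp only [List.length_cons]; omega
  | case4 a b rest h ih => simp only [List.length_cons] at ih ⊢; omega

theorem pvReplaceAll_length_lt (l : List Char) (h : pvHasPair l = true) :
    (pvReplaceAll l).length < l.length := by
  fun_induction pvReplaceAll l with
  | case1 => simp [pvHasPair] at h
  | case2 => simp [pvHasPair] at h
  | case3 a b rest hp ih =>
    have := pvReplaceAll_length_le rest
    simp only [List.length_cons]; omega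
  | case4 a b rest hp ih =>
    simp only [pvHasPair, Bool.or_eq_true] at h
    rcases h with h | h
    · exact absurd h hp
    · have := ih h
      simp only [List.length_cons] at this ⊢
      omega

-- `while '<>' in s: s = s.replace('<>', '')`
def pvReduce (l : List Char) : List Char :=
  if h : pvHasPair l = true then pvReduce (pvReplaceAll l) else l
termination_by l.length
decreasing_by exact pvReplaceAll_length_lt l h

def has_unmatched_angle_brackets_py_alt (query : String) : Bool :=
  let s := query.toList.filter pvIsBr
  let t := pvReduce s
  t.contains '<' || t.contains '>'

-- ===== PRECONDITION & SPEC =====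
def Spec_has_unmatched_angle_brackets_py (query : String) (out : Bool) : Prop := out = has_unmatched_angle_brackets_py_alt query
instance (query : String) (out : Bool) : Decidable (Spec_has_unmatched_angle_brackets_py query out) := by unfold Spec_has_unmatched_angle_brackets_py; infer_instance

-- ===== CLAIM (what is proved, stated in full; the proofs are below) =====
def Claim_equal_has_unmatched_angle_brackets_py : Prop := ∀ (query : String), Dom_has_unmatched_angle_brackets_py query → Spec_has_unmatched_angle_brackets_py query (has_unmatched_angle_brackets_py query)

-- ===== LEMMAS AND PROOFS =====

-- per-character depth delta, total depth, and min prefix depth (over all prefixes)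
def pvDelta (c : Char) : Int := if c = '<' then 1 else if c = '>' then -1 else 0

def pvTot : List Char → Int
  | [] => 0
  | c :: r => pvDelta c + pvTot r

def pvMp : List Char → Int
  | [] => 0
  | c :: r => min 0 (pvDelta c + pvMp r)

theorem pvMp_nonpos (l : List Char) : pvMp l ≤ 0 := by
  cases l <;> simp [pvMp]

-- characterization of A's loop
theorem pvGoA_char (l : List Char) : ∀ d : Int, 0 ≤ d →
    pvGoA l d = decide (d + pvMp l < 0 ∨ d + pvTot l ≠ 0) := by
  induction l with
  | nil =>
    intro d hd
    simp only [pvGoA, pvMp, pvTot]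
    rw [show ((d ≠ 0) : Bool) = decide (d ≠ 0) from rfl, decide_eq_decide]
    omega
  | cons c r ih =>
    intro d hd
    have hr := pvMp_nonpos r
    simp only [pvGoA, pvMp, pvTot]
    have hδ : (if c = '<' then d + 1 else if c = '>' then d - 1 else d) = d + pvDelta c := by
      simp only [pvDelta]; split_ifs <;> omega
    rw [hδ]
    by_cases hneg : d + pvDelta c < 0
    · simp only [if_pos hneg]
      have : d + min 0 (pvDelta c + pvMp r) < 0 := by omega
      simp [this]
    · simp only [if_neg hneg]
      rw [ih (d + pvDelta c) (by omega), decide_eq_decide]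
      omega

-- filtering out non-bracket characters changes neither total nor min prefix depth
theorem pvTot_filter (l : List Char) : pvTot (l.filter pvIsBr) = pvTot l := by
  induction l with
  | nil => rfl
  | cons c r ih =>
    by_cases h : pvIsBr c = true
    · simp [List.filter, h, pvTot, ih]
    · have h0 : pvDelta c = 0 := by
        simp [pvIsBr] at h; simp [pvDelta, h]
      simp [List.filter, h, pvTot, ih, h0]

theorem pvMp_filter (l : List Char) : pvMp (l.filter pvIsBr) = pvMp l := by
  induction l with
  | nil => rfl
  | cons c r ih =>
    by_cases h : pvIsBr c = true
    · simp [List.filter, h, pvMp, ih]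
    · have h0 : pvDelta c = 0 := by
        simp [pvIsBr] at h; simp [pvDelta, h]
      have := pvMp_nonpos r
      simp only [List.filter, h, pvMp, ih, h0]
      omega

-- one replace pass changes neither total nor min prefix depth, and keeps bracket-only
theorem pvTot_replaceAll (l : List Char) : pvTot (pvReplaceAll l) = pvTot l := by
  fun_induction pvReplaceAll l with
  | case1 => rfl
  | case2 => rfl
  | case3 a b rest h ih =>
    simp only [Bool.and_eq_true, decide_eq_true_eq] at h
    simp only [pvTot, ih, pvDelta, h.1, h.2]
    simp
  | case4 a b rest h ih =>
    simp only [pvTot, ih]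

theorem pvMp_replaceAll (l : List Char) : pvMp (pvReplaceAll l) = pvMp l := by
  fun_induction pvReplaceAll l with
  | case1 => rfl
  | case2 => rfl
  | case3 a b rest h ih =>
    simp only [Bool.and_eq_true, decide_eq_true_eq] at h
    have := pvMp_nonpos rest
    simp only [pvMp, ih, pvDelta, h.1, h.2]
    simp
    omega
  | case4 a b rest h ih =>
    simp only [pvMp, ih]

theorem pvBr_replaceAll (l : List Char) (hb : l.all pvIsBr = true) :
    (pvReplaceAll l).all pvIsBr = true := by
  fun_induction pvReplaceAll l with
  | case1 => rfl
  | case2 => exact hb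
  | case3 a b rest h ih =>
    simp only [List.all_cons, Bool.and_eq_true] at hb
    exact ih hb.2.2
  | case4 a b rest h ih =>
    simp only [List.all_cons, Bool.and_eq_true] at hb ⊢
    exact ⟨hb.1, ih (by simp only [List.all_cons, Bool.and_eq_true]; exact ⟨hb.2.1, hb.2.2⟩)⟩

-- the while-loop preserves the invariants and ends without any "<>" pair
theorem pvTot_reduce (l : List Char) : pvTot (pvReduce l) = pvTot l := by
  fun_induction pvReduce l with
  | case1 l h ih => rw [ih, pvTot_replaceAll]
  | case2 l h => rfl

theorem pvMp_reduce (l : List Char) : pvMp (pvReduce l) = pvMp l := by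
  fun_induction pvReduce l with
  | case1 l h ih => rw [ih, pvMp_replaceAll]
  | case2 l h => rfl

theorem pvBr_reduce (l : List Char) (hb : l.all pvIsBr = true) :
    (pvReduce l).all pvIsBr = true := by
  fun_induction pvReduce l with
  | case1 l h ih => exact ih (pvBr_replaceAll l hb)
  | case2 l h => exact hb

theorem pvHasPair_reduce (l : List Char) : pvHasPair (pvReduce l) = false := by
  fun_induction pvReduce l with
  | case1 l h ih => exact ih
  | case2 l h => simpa using h

-- a pair-free bracket-only list starting with '<' is all '<'
theorem pvAllLt (l : List Char) : ∀ (_ : pvHasPair ('<' :: l) = false)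
    (_ : ('<' :: l).all pvIsBr = true), pvTot ('<' :: l) = ('<' :: l).length := by
  induction l with
  | nil => intro _ _; simp [pvTot, pvDelta]
  | cons c r ih =>
    intro hp hb
    simp only [List.all_cons, Bool.and_eq_true] at hb
    have hc : c = '<' := by
      by_cases hgt : c = '>'
      · exfalso; simp [pvHasPair, hgt] at hp
      · have := hb.2.1
        simp only [pvIsBr, Bool.or_eq_true, decide_eq_true_eq] at this
        rcases this with h | h
        · exact h
        · exact absurd h hgt
    subst hc
    have hp2 : pvHasPair ('<' :: r) = false := by
      simpa [pvHasPair] using hp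
    have hrec := ih hp2 (by simp only [List.all_cons, Bool.and_eq_true]; exact ⟨hb.1, hb.2.2⟩)
    simp [pvTot, pvDelta] at hrec ⊢
    omega

-- on a pair-free bracket-only list, A's condition is exactly non-emptiness
theorem pvNormal (l : List Char) (hb : l.all pvIsBr = true) (hp : pvHasPair l = false) :
    (pvMp l < 0 ∨ pvTot l ≠ 0) ↔ l ≠ [] := by
  cases l with
  | nil => simp [pvMp, pvTot]
  | cons c r =>
    simp only [List.all_cons, Bool.and_eq_true] at hb
    have hcbr := hb.1
    simp only [pvIsBr, Bool.or_eq_true, decide_eq_true_eq] at hcbr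
    constructor
    · intro _; simp
    · intro _
      rcases hcbr with hc | hc
      · subst hc
        right
        have := pvAllLt r hp (by simp only [List.all_cons, Bool.and_eq_true]; exact ⟨hb.1, hb.2⟩)
        rw [this]
        simp only [List.length_cons]
        push_cast
        omega
      · subst hc
        left
        have := pvMp_nonpos r
        simp [pvMp, pvDelta]
        omega

theorem pvContains_br (l : List Char) (hb : l.all pvIsBr = true) :
    (l.contains '<' || l.contains '>') = decide (l ≠ []) := by
  cases l with
  | nil => simp
  | cons c r =>
    simp only [List.all_cons, Bool.and_eq_true] at hb
    have hcbr := hb.1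
    simp only [pvIsBr, Bool.or_eq_true, decide_eq_true_eq] at hcbr
    rcases hcbr with hc | hc <;> subst hc <;> simp

-- ===== VERDICT (by name: the statement is the Claim_ definition above) =====
theorem has_unmatched_angle_brackets_py_spec : Claim_equal_has_unmatched_angle_brackets_py := by
  intro query _
  unfold Spec_has_unmatched_angle_brackets_py
  unfold has_unmatched_angle_brackets_py has_unmatched_angle_brackets_py_alt
  set l := query.toList with hl
  set f := l.filter pvIsBr with hf
  set t := pvReduce f with ht
  have hbf : f.all pvIsBr = true := by
    rw [hf, List.all_eq_true]
    intro c hc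
    exact (List.mem_filter.mp hc).2
  have hbt : t.all pvIsBr = true := pvBr_reduce f hbf
  have hpt : pvHasPair t = false := pvHasPair_reduce f
  rw [pvGoA_char l 0 le_rfl, pvContains_br t hbt, decide_eq_decide]
  have h1 : pvMp t = pvMp l := by rw [ht, pvMp_reduce, hf, pvMp_filter]
  have h2 : pvTot t = pvTot l := by rw [ht, pvTot_reduce, hf, pvTot_filter]
  rw [show (0 : Int) + pvMp l = pvMp l by ring, show (0 : Int) + pvTot l = pvTot l by ring,
    ← h1, ← h2]
  exact pvNormal t hbt hpt
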